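-- pv_equiv track=rewrite | github.com/Tejaraju0/MealMate-Fullstack-ML | ml-service/ml_service.py | get_category_item
-- ===== SOURCE A (Python) =====
-- def get_category_item(category, known_items):
--     """Get representative item for category."""
--     for item in known_items:
--         if 'Burger' in item or 'Fish' in item or 'Chicken' in item:
--             if category == 'meal':
--                 return item
--         if 'Chips' in item or 'Bread' in item:
--             if category == 'snack':
--                 return item
--         if 'Scone' in item or 'Croissant' in item:
--             if category == 'bakery':
--                 return item
--         if 'Juice' in item or 'Coffee' in item:
--             if category == 'beverages':
--                 return item
--         if 'Cake' in item or 'Ice Cream' in item: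
--             if category == 'desserts':
--                 return item
--         if 'Salad' in item or 'Soup' in item:
--             if category == 'sides':
--                 return item
--     return known_items[0]
-- ===== SOURCE B (Python) =====
-- CATEGORY_KEYWORDS = {
--     'meal': ('Burger', 'Fish', 'Chicken'),
--     'snack': ('Chips', 'Bread'),
--     'bakery': ('Scone', 'Croissant'),
--     'beverages': ('Juice', 'Coffee'),
--     'desserts': ('Cake', 'Ice Cream'),
--     'sides': ('Salad', 'Soup'),
-- }
--
-- def first_index(kw, items):
--     """Index of the first item containing kw, or None."""
--     for i, item in enumerate(items):
--         if kw in item: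
--             return i
--     return None
--
-- def get_category_item(category, known_items):
--     """Get representative item for category."""
--     indices = [first_index(kw, known_items)
--                for kw in CATEGORY_KEYWORDS.get(category, ())]
--     hits = [i for i in indices if i is not None]
--     return known_items[min(hits)] if hits else known_items[0]
-- ===== Notes on version B (the rewrite author's own statement) =====
-- stated objective: alternative
-- what changed: Keyword-major instead of item-major: for each keyword of the category B computes the index of its first occurrence over the whole item list, then returns the item at the minimum of those indices (known_items[0] if there is none), replacing A's item-major scan with its six-branch cascade per item; the per-item Python-level branch work disappears.
import Mathlib
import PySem

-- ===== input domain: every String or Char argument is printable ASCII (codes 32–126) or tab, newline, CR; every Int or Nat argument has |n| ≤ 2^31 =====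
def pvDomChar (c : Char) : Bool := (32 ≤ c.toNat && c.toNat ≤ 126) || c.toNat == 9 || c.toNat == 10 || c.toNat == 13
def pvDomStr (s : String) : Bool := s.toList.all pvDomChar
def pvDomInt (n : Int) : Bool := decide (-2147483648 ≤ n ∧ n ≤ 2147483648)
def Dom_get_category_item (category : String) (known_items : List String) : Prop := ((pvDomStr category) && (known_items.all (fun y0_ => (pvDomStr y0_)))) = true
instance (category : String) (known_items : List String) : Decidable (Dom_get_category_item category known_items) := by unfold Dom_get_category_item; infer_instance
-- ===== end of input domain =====

-- B is keyword-major instead of item-major: it finds the first-occurrence index of each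
-- keyword of the category over the whole list, then returns the item at the minimum
-- index (known_items[0] if none) — an alternative traversal order, same cost.

-- ===== PORT A =====
-- the for-loop over known_items with its branch cascade; none = loop fell through
def pvLoopA (category : String) : List String → Option String
  | [] => none
  | item :: rest =>
    if (PySem.Str.isIn "Burger" item || PySem.Str.isIn "Fish" item || PySem.Str.isIn "Chicken" item)
        && category == "meal" then some item
    else if (PySem.Str.isIn "Chips" item || PySem.Str.isIn "Bread" item)
        && category == "snack" then some item
    else if (PySem.Str.isIn "Scone" item || PySem.Str.isIn "Croissant" item)
        && category == "bakery" then some item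
    else if (PySem.Str.isIn "Juice" item || PySem.Str.isIn "Coffee" item)
        && category == "beverages" then some item
    else if (PySem.Str.isIn "Cake" item || PySem.Str.isIn "Ice Cream" item)
        && category == "desserts" then some item
    else if (PySem.Str.isIn "Salad" item || PySem.Str.isIn "Soup" item)
        && category == "sides" then some item
    else pvLoopA category rest

def get_category_item (category : String) (known_items : List String) : String :=
  match pvLoopA category known_items with
  | some item => item
  -- known_items[0]: IndexError (excluded by Pre_) only when known_items = []
  | none => ((PySem.List.pyGet? known_items 0).getD "")

-- ===== PORT B =====
def pvCategoryKeywords : PySem.Dict String (List String) :=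
  PySem.Dict.ofList
    [("meal", ["Burger", "Fish", "Chicken"]),
     ("snack", ["Chips", "Bread"]),
     ("bakery", ["Scone", "Croissant"]),
     ("beverages", ["Juice", "Coffee"]),
     ("desserts", ["Cake", "Ice Cream"]),
     ("sides", ["Salad", "Soup"])]

-- first_index(kw, items): the enumerate-and-return loop as structural recursion
def pvFirstIndex (kw : String) : List String → Option Nat
  | [] => none
  | item :: rest =>
    if PySem.Str.isIn kw item then some 0 else (pvFirstIndex kw rest).map (· + 1)

def get_category_item_alt (category : String) (known_items : List String) : String :=
  let indices := (pvCategoryKeywords.getD category []).map (fun kw => pvFirstIndex kw known_items)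
  let hits := indices.filterMap id
  match PySem.List.min? hits (fun y => y) with        -- min(hits) when hits is nonempty
  | some i => ((PySem.List.pyGet? known_items (i : Int)).getD "")
  | none => ((PySem.List.pyGet? known_items 0).getD "")

-- ===== PRECONDITION & SPEC =====
-- A raises IndexError exactly when known_items is empty (the loop ran zero times and
-- known_items[0] is evaluated); B raises there too.
def Pre_get_category_item (category : String) (known_items : List String) : Prop :=
  known_items ≠ []
instance (category : String) (known_items : List String) : Decidable (Pre_get_category_item category known_items) := by unfold Pre_get_category_item; infer_instance

def pvWitness_get_category_item : String × List String := ("meal", ["Veg Burger", "Chips"])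

def Spec_get_category_item (category : String) (known_items : List String) (out : String) : Prop := out = get_category_item_alt category known_items
instance (category : String) (known_items : List String) (out : String) : Decidable (Spec_get_category_item category known_items out) := by unfold Spec_get_category_item; infer_instance

-- ===== CLAIM (what is proved, stated in full; the proofs are below) =====
def Claim_equal_get_category_item : Prop := ∀ (category : String) (known_items : List String), Dom_get_category_item category known_items → Pre_get_category_item category known_items → Spec_get_category_item category known_items (get_category_item category known_items)

-- ===== LEMMAS AND PROOFS =====

-- an if-cascade returning the same value in every branch is one if on the disjunction
theorem pvIfCascade {α : Type} (c1 c2 c3 c4 c5 c6 : Bool) (x y : α) :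
    (if c1 then x else if c2 then x else if c3 then x else if c4 then x
      else if c5 then x else if c6 then x else y)
      = if c1 || c2 || c3 || c4 || c5 || c6 then x else y := by
  cases c1 <;> cases c2 <;> cases c3 <;> cases c4 <;> cases c5 <;> cases c6 <;> simp

-- per-item: A's branch cascade fires iff some keyword of B's table entry occurs in the item
theorem pvCond_eq (category item : String) :
    (((PySem.Str.isIn "Burger" item || PySem.Str.isIn "Fish" item || PySem.Str.isIn "Chicken" item) && category == "meal") || ((PySem.Str.isIn "Chips" item || PySem.Str.isIn "Bread" item) && category == "snack") || ((PySem.Str.isIn "Scone" item || PySem.Str.isIn "Croissant" item) && category == "bakery") || ((PySem.Str.isIn "Juice" item || PySem.Str.isIn "Coffee" item) && category == "beverages") || ((PySem.Str.isIn "Cake" item || PySem.Str.isIn "Ice Cream" item) && category == "desserts") || ((PySem.Str.isIn "Salad" item || PySem.Str.isIn "Soup" item) && category == "sides"))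
    = (pvCategoryKeywords.getD category []).any (fun kw => PySem.Str.isIn kw item) := by
  by_cases h1 : category = "meal"
  · subst h1
    have t : pvCategoryKeywords.getD "meal" [] = ["Burger", "Fish", "Chicken"] := rfl
    simp [t, Bool.or_assoc]
  by_cases h2 : category = "snack"
  · subst h2
    have t : pvCategoryKeywords.getD "snack" [] = ["Chips", "Bread"] := rfl
    simp [t, Bool.or_assoc]
  by_cases h3 : category = "bakery"
  · subst h3
    have t : pvCategoryKeywords.getD "bakery" [] = ["Scone", "Croissant"] := rfl
    simp [t, Bool.or_assoc]
  by_cases h4 : category = "beverages"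
  · subst h4
    have t : pvCategoryKeywords.getD "beverages" [] = ["Juice", "Coffee"] := rfl
    simp [t, Bool.or_assoc]
  by_cases h5 : category = "desserts"
  · subst h5
    have t : pvCategoryKeywords.getD "desserts" [] = ["Cake", "Ice Cream"] := rfl
    simp [t, Bool.or_assoc]
  by_cases h6 : category = "sides"
  · subst h6
    have t : pvCategoryKeywords.getD "sides" [] = ["Salad", "Soup"] := rfl
    simp [t, Bool.or_assoc]
  -- category outside the table: the dict lookup is empty and no branch can fire
  have e1 : (("meal" : String) == category) = false := by simp [Ne.symm h1]
  have e2 : (("snack" : String) == category) = false := by simp [Ne.symm h2]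
  have e3 : (("bakery" : String) == category) = false := by simp [Ne.symm h3]
  have e4 : (("beverages" : String) == category) = false := by simp [Ne.symm h4]
  have e5 : (("desserts" : String) == category) = false := by simp [Ne.symm h5]
  have e6 : (("sides" : String) == category) = false := by simp [Ne.symm h6]
  have t : pvCategoryKeywords.getD category [] = [] := by
    simp [pvCategoryKeywords, PySem.Dict.getD, PySem.Dict.get?, PySem.Dict.ofList,
      PySem.Dict.update, PySem.Dict.insert, PySem.Dict.contains, PySem.Dict.empty,
      List.find?, e1, e2, e3, e4, e5, e6]
  simp [t, h1, h2, h3, h4, h5, h6]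

-- A's loop is the first-match scan for "some keyword of the category occurs in the item"
theorem pvLoopA_eq_find? (category : String) (l : List String) :
    pvLoopA category l
      = l.find? (fun item => (pvCategoryKeywords.getD category []).any
          (fun kw => PySem.Str.isIn kw item)) := by
  induction l with
  | nil => rfl
  | cons item rest ih =>
    simp only [pvLoopA]
    rw [pvIfCascade, pvCond_eq, List.find?_cons]
    cases h : (pvCategoryKeywords.getD category []).any (fun kw => PySem.Str.isIn kw item)
    · simp [ih]
    · simp

theorem pvFilterMap_map_succ (l : List (Option Nat)) :
    (l.map (Option.map (· + 1))).filterMap id = (l.filterMap id).map (· + 1) := by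
  induction l with
  | nil => rfl
  | cons a t ih => cases a <;> simp_all

theorem pvFoldlMin_succ (t : List Nat) (x : Nat) :
    (t.map (· + 1)).foldl min (x + 1) = t.foldl min x + 1 := by
  induction t generalizing x with
  | nil => rfl
  | cons a s ih => simp [List.foldl, Nat.succ_min_succ, ih]

theorem pvMin_map_succ (xs : List Nat) :
    PySem.List.min? (xs.map (· + 1)) (fun y => y)
      = (PySem.List.min? xs (fun y => y)).map (· + 1) := by
  cases xs with
  | nil => rfl
  | cons x t =>
    simp [PySem.List.min?_id_cons, pvFoldlMin_succ]

theorem pvMin_zero {xs : List Nat} (h0 : 0 ∈ xs) :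
    PySem.List.min? xs (fun y => y) = some 0 := by
  cases e : PySem.List.min? xs (fun y => y) with
  | none =>
    rw [PySem.List.min?_eq_none_iff] at e
    subst e; simp at h0
  | some m =>
    have := PySem.List.min?_isMin e 0 h0
    rw [Nat.le_zero.mp this]

-- the minimum first-occurrence index over the keywords IS the index of the first item
-- containing some keyword
theorem pvMinHits_eq_findIdx? (kws : List String) (l : List String) :
    PySem.List.min? ((kws.map (fun kw => pvFirstIndex kw l)).filterMap id) (fun y => y)
      = l.findIdx? (fun item => kws.any (fun kw => PySem.Str.isIn kw item)) := by
  induction l with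
  | nil =>
    simp [pvFirstIndex, List.filterMap_map]
  | cons item rest ih =>
    rw [List.findIdx?_cons]
    cases h : kws.any (fun kw => PySem.Str.isIn kw item) with
    | true =>
      simp only [if_true]
      obtain ⟨kw, hmem, hin⟩ := List.any_eq_true.mp h
      apply pvMin_zero
      have hin' : PySem.Chars.isIn kw.toList item.toList = true := by simpa using hin
      have : pvFirstIndex kw (item :: rest) = some 0 := by simp [pvFirstIndex, hin']
      exact List.mem_filterMap.mpr ⟨some 0, List.mem_map.mpr ⟨kw, hmem, this⟩, rfl⟩
    | false =>
      have hall : ∀ kw ∈ kws, PySem.Chars.isIn kw.toList item.toList = false := by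
        intro kw hk
        by_contra hne
        simp only [List.any_eq_false] at h
        exact hne (by simpa using h kw hk)
      have hmap : kws.map (fun kw => pvFirstIndex kw (item :: rest))
          = (kws.map (fun kw => pvFirstIndex kw rest)).map (Option.map (· + 1)) := by
        rw [List.map_map]
        exact List.map_congr_left (fun kw hk => by simp [pvFirstIndex, hall kw hk])
      simp only [Bool.false_eq_true, if_false]
      rw [hmap, pvFilterMap_map_succ, pvMin_map_succ, ih]

-- a first-occurrence index is a valid index
theorem pvFirstIndex_lt {kw : String} {l : List String} {i : Nat}
    (h : pvFirstIndex kw l = some i) : i < l.length := by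
  induction l generalizing i with
  | nil => simp [pvFirstIndex] at h
  | cons a t ih =>
    simp only [pvFirstIndex] at h
    split at h
    · cases h; simp
    · cases hj : pvFirstIndex kw t with
      | none => simp [hj] at h
      | some j =>
        rw [hj] at h; cases h
        simpa using Nat.succ_lt_succ (ih hj)

-- ===== VERDICT (by name: the statement is the Claim_ definition above) =====
theorem get_category_item_spec : Claim_equal_get_category_item := by
  intro category known_items _ _
  unfold Spec_get_category_item get_category_item get_category_item_alt
  dsimp only
  rw [pvLoopA_eq_find?, List.find?_eq_bind_findIdx?_getElem?,
    ← pvMinHits_eq_findIdx? (pvCategoryKeywords.getD category [])]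
  cases e : PySem.List.min?
      (((pvCategoryKeywords.getD category []).map
        (fun kw => pvFirstIndex kw known_items)).filterMap id) (fun y => y) with
  | none => simp
  | some i =>
    -- i is a genuine index, so both sides read known_items[i]
    have hmem := PySem.List.min?_mem e
    obtain ⟨o, ho, hoi⟩ := List.mem_filterMap.mp hmem
    obtain ⟨kw, _, hkw⟩ := List.mem_map.mp ho
    have hlt : i < known_items.length := pvFirstIndex_lt (by rw [hkw]; exact hoi)
    simp [PySem.List.pyGet?_natCast, List.getElem?_eq_getElem hlt]
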